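-- pv_equiv track=rewrite | github.com/k-goe/ethertracer | src/ethertracer/helpers.py | segment_list
-- ===== SOURCE A (Python) =====
-- def segment_list(flags_segment_start, flags_segment_end):
--     """
--     Divides a list into segments that are determined by the given start and end points
--
--     :param flags_segment_start: List of booleans. Determines all segment start points
--     :param flags_segment_end:  List of booleans. Determines all segment end points
--     :return: Returns a list of integers where every integer determines a segment
--     """
--
--     segments = []
--     segment_counter = 0
--
--     for i in range(len(flags_segment_start)):
--
--         if (flags_segment_start[i]):
--             segment_counter = segment_counter + 1
--             segments.append(segment_counter)
--
--         elif (flags_segment_end[i]):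
--             segments.append(segment_counter)
--             segment_counter = segment_counter + 1
--         else:
--             segments.append(segment_counter)
--
--     return segments
-- ===== SOURCE B (Python) =====
-- def segment_list(flags_segment_start, flags_segment_end):
--     """
--     Same result via an increment table + prefix sum instead of a stateful counter loop:
--     label[i] = (# of j<i with start[j] or end[j]) + (1 if start[i] else 0).
--     """
--     n = len(flags_segment_start)
--     inc = [1 if (flags_segment_start[i] or flags_segment_end[i]) else 0
--            for i in range(n)]
--     prefix = [0]
--     for x in inc:
--         prefix.append(prefix[-1] + x)
--     return [prefix[i] + (1 if flags_segment_start[i] else 0) for i in range(n)]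
-- ===== Notes on version B (the rewrite author's own statement) =====
-- stated objective: alternative
-- what changed: Replaces the single stateful counter loop with a closed-form characterisation: an 0/1 increment table, an exclusive prefix sum over it, and a final offset pass (label[i] = prefix[i] + [start[i]]).
import Mathlib
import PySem

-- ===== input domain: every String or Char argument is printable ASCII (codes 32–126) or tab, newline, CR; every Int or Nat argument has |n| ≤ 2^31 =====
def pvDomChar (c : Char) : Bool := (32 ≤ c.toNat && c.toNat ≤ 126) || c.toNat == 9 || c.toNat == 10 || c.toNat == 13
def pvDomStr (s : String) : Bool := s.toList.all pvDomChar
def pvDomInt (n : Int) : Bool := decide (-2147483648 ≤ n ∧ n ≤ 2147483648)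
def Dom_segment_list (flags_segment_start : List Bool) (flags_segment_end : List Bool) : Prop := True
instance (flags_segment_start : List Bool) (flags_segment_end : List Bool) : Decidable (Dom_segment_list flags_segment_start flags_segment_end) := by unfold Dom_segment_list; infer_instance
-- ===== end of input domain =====

-- B replaces A's stateful counter loop by an increment table + exclusive prefix sum + offset pass
-- (label[i] = prefix[i] + [start[i]]); same cost, different decomposition.

-- ===== PORT A =====
-- one loop over range(len(start)); state = (segments, segment_counter)
def segment_list (flags_segment_start : List Bool) (flags_segment_end : List Bool) : List Int :=
  ((PySem.List.pyRange 0 (flags_segment_start.length : Int) 1).foldl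
    (fun (st : List Int × Int) i =>
      if PySem.List.pyGetD flags_segment_start i false then
        (st.1 ++ [st.2 + 1], st.2 + 1)
      else if PySem.List.pyGetD flags_segment_end i false then
        (st.1 ++ [st.2], st.2 + 1)
      else
        (st.1 ++ [st.2], st.2))
    ([], 0)).1

-- ===== PORT B =====
def segment_list_alt (flags_segment_start : List Bool) (flags_segment_end : List Bool) : List Int :=
  let n : Int := (flags_segment_start.length : Int)
  let inc : List Int := (PySem.List.pyRange 0 n 1).map (fun i =>
    if PySem.List.pyGetD flags_segment_start i false || PySem.List.pyGetD flags_segment_end i false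
    then 1 else 0)
  let pfx : List Int := inc.foldl (fun p x => p ++ [p.getLastD 0 + x]) [0]
  (PySem.List.pyRange 0 n 1).map (fun i =>
    PySem.List.pyGetD pfx i 0 +
      (if PySem.List.pyGetD flags_segment_start i false then 1 else 0))

-- ===== PRECONDITION & SPEC =====
-- Pre_ excludes exactly the inputs where Python A raises IndexError: some position i has
-- flags_segment_start[i] falsy while i is out of range for flags_segment_end (B raises there too).
def Pre_segment_list (flags_segment_start : List Bool) (flags_segment_end : List Bool) : Prop :=
  ∀ i : Nat, i < flags_segment_start.length →
    (flags_segment_start.getD i false = true ∨ i < flags_segment_end.length)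
instance (flags_segment_start : List Bool) (flags_segment_end : List Bool) : Decidable (Pre_segment_list flags_segment_start flags_segment_end) := by unfold Pre_segment_list; infer_instance
def pvWitness_segment_list : List Bool × List Bool := ([true, false, false, true], [false, false, true, false])

def Spec_segment_list (flags_segment_start : List Bool) (flags_segment_end : List Bool) (out : List Int) : Prop := out = segment_list_alt flags_segment_start flags_segment_end
instance (flags_segment_start : List Bool) (flags_segment_end : List Bool) (out : List Int) : Decidable (Spec_segment_list flags_segment_start flags_segment_end out) := by unfold Spec_segment_list; infer_instance

-- ===== CLAIM (what is proved, stated in full; the proofs are below) =====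
def Claim_equal_segment_list : Prop := ∀ (flags_segment_start : List Bool) (flags_segment_end : List Bool), Dom_segment_list flags_segment_start flags_segment_end → Pre_segment_list flags_segment_start flags_segment_end → Spec_segment_list flags_segment_start flags_segment_end (segment_list flags_segment_start flags_segment_end)

-- ===== LEMMAS AND PROOFS =====

-- running counter after k steps = number of flagged positions among the first k
def pvCnt (s e : List Bool) (k : Nat) : Int :=
  ((List.range k).countP (fun i => s.getD i false || e.getD i false) : Int)

theorem pvCnt_succ (s e : List Bool) (k : Nat) :
    pvCnt s e (k + 1) = pvCnt s e k + (if s.getD k false || e.getD k false then 1 else 0) := by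
  simp only [pvCnt, List.range_succ, List.countP_append, List.countP_cons, List.countP_nil]
  split <;> simp_all

theorem pvCast_succ (n : Nat) : ((n + 1 : Nat) : Int) = (n : Int) + 1 := by push_cast; ring

-- A's fold state after the first n indices
theorem segA_state (s e : List Bool) (n : Nat) :
    (PySem.List.pyRange 0 (n : Int) 1).foldl
      (fun (st : List Int × Int) i =>
        if PySem.List.pyGetD s i false then (st.1 ++ [st.2 + 1], st.2 + 1)
        else if PySem.List.pyGetD e i false then (st.1 ++ [st.2], st.2 + 1)
        else (st.1 ++ [st.2], st.2))
      ([], 0)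
    = ((List.range n).map
        (fun i => pvCnt s e i + (if s.getD i false then 1 else 0)), pvCnt s e n) := by
  induction n with
  | zero => simp [PySem.List.pyRange_one_eq_nil, pvCnt]
  | succ n ih =>
    rw [pvCast_succ, PySem.List.pyRange_one_succ_right (by positivity),
      List.foldl_append, ih]
    simp only [List.foldl_cons, List.foldl_nil, PySem.List.pyGetD_natCast,
      List.range_succ, List.map_append, List.map_cons, List.map_nil, pvCnt_succ]
    by_cases hs : s[n]?.getD false = true
    · simp [hs]
    · by_cases he : e[n]?.getD false = true
      · simp [hs, he]
      · simp [hs, he]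

-- B's prefix list is exactly pvCnt on 0..n
theorem segB_prefix (s e : List Bool) (n : Nat) :
    ((PySem.List.pyRange 0 (n : Int) 1).map (fun i =>
        if PySem.List.pyGetD s i false || PySem.List.pyGetD e i false then (1 : Int) else 0)).foldl
      (fun p x => p ++ [p.getLastD 0 + x]) [0]
    = (List.range (n + 1)).map (fun i => pvCnt s e i) := by
  induction n with
  | zero => simp [PySem.List.pyRange_one_eq_nil, pvCnt]
  | succ n ih =>
    rw [pvCast_succ, PySem.List.pyRange_one_succ_right (by positivity),
      List.map_append, List.foldl_append, ih]
    simp only [List.map_cons, List.map_nil, List.foldl_cons, List.foldl_nil,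
      PySem.List.pyGetD_natCast]
    rw [List.range_succ (n := n + 1), List.map_append]
    congr 1
    have hlast : ((List.range (n + 1)).map (fun i => pvCnt s e i)).getLastD 0 = pvCnt s e n := by
      rw [List.range_succ, List.map_append]
      simp
    rw [hlast]
    simp [pvCnt_succ]

theorem pvPrefix_getD (s e : List Bool) (n i : Nat) (hi : i < n + 1) :
    ((List.range (n + 1)).map (fun j => pvCnt s e j)).getD i 0 = pvCnt s e i := by
  rw [List.getD_eq_getElem?_getD]
  simp [List.getElem?_map, List.getElem?_range hi]

-- ===== VERDICT (by name: the statement is the Claim_ definition above) =====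
theorem segment_list_spec : Claim_equal_segment_list := by
  intro s e _ _
  unfold Spec_segment_list
  simp only [segment_list, segment_list_alt]
  rw [segA_state, segB_prefix]
  rw [PySem.List.pyRange_zero_nat, List.map_map]
  apply List.ext_getElem
  · simp
  · intro i h1 h2
    simp only [List.getElem_map, List.getElem_range, Function.comp_apply,
      PySem.List.pyGetD_natCast]
    simp only [List.length_map, List.length_range] at h1
    rw [pvPrefix_getD s e s.length i (by omega)]
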